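-- pv_equiv track=rewrite | github.com/MlvPrasadOfficial/SCALER_DSML_MAR_2022_SOLUTIONS_BY_MLV_PRASAD | AA_ASSIGNMENTS/Day026 - Intermediate DSA Stacks and Queues - Basics/a02.py | solve
-- ===== SOURCE A (Python) =====
-- from collections import deque
--
-- def solve(A):
--     ans = []
--     q = deque()
--     q.append(1)
--     q.append(2)
--     q.append(3)
--     cnt = 3
--     while len(ans) < A:
--         x = q.popleft()
--         ans.append(x)
--         if cnt>=A: continue
--         x1 = x * 10 + 1
--         x2 = x * 10 + 2
--         x3 = x * 10 + 3
--         q.append(x1)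
--         q.append(x2)
--         q.append(x3)
--         cnt += 3
--
--     return ans
-- ===== SOURCE B (Python) =====
-- def solve(A):
--     # Level-at-a-time generation: no queue; each pass appends a whole
--     # digit-length's worth of numbers (sliced to what is still needed)
--     # and derives the next length's numbers by a comprehension.
--     ans = []
--     level = [1, 2, 3]
--     while len(ans) < A:
--         ans += level[:A - len(ans)]
--         level = [10 * x + d for x in level for d in (1, 2, 3)]
--     return ans
-- ===== Notes on version B (the rewrite author's own statement) =====
-- stated objective: simpler
-- what changed: Replaced the element-by-element deque BFS with cnt bookkeeping by level-at-a-time generation: append each digit-length's whole block (sliced to the remaining need) and build the next length's numbers with a comprehension.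
import Mathlib
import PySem

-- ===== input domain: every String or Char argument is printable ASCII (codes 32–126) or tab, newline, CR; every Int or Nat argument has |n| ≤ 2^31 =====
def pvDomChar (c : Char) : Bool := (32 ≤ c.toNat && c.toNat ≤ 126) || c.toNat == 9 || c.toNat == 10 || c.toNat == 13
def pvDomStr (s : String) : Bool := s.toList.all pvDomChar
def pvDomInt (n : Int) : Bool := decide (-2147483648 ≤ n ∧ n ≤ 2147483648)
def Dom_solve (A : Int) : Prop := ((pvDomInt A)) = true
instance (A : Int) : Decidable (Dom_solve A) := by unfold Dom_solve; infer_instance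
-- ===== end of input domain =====

-- B replaces the element-by-element deque BFS with level-at-a-time generation (simpler, same O(A) cost).


-- ===== PORT A =====
-- while loop ported with fuel = (A - len ans).toNat, which is exactly the
-- number of remaining iterations (the guard is len ans < A and each
-- iteration appends one element).  The [] branch of the pop is unreachable
-- (the deque is never empty when popped, for any int A).
def solveLoop (A : Int) : Nat → List Int → List Int → Int → List Int
  | 0, ans, _, _ => ans
  | fuel+1, ans, q, cnt =>
    match q with
    | [] => ans   -- unreachable: Python's deque is never empty here
    | x :: qs =>
      if cnt ≥ A then
        solveLoop A fuel (ans ++ [x]) qs cnt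
      else
        solveLoop A fuel (ans ++ [x]) (qs ++ [x * 10 + 1, x * 10 + 2, x * 10 + 3]) (cnt + 3)

def solve (A : Int) : List Int := solveLoop A A.toNat [] [1, 2, 3] 3

-- ===== PORT B =====
-- while loop ported with fuel = A.toNat (each iteration appends at least one
-- element, so at most A.toNat iterations run before the guard fails).
def altLoop (A : Int) : Nat → List Int → List Int → List Int
  | 0, ans, _ => ans
  | fuel+1, ans, level =>
    if (ans.length : Int) < A then
      altLoop A fuel (ans ++ level.take (A - (ans.length : Int)).toNat)
        (level.flatMap (fun x => [10 * x + 1, 10 * x + 2, 10 * x + 3]))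
    else ans

def solve_alt (A : Int) : List Int := altLoop A A.toNat [] [1, 2, 3]

-- ===== PRECONDITION & SPEC =====
def Spec_solve (A : Int) (out : List Int) : Prop := out = solve_alt A
instance (A : Int) (out : List Int) : Decidable (Spec_solve A out) := by unfold Spec_solve; infer_instance

-- ===== CLAIM (what is proved, stated in full; the proofs are below) =====
def Claim_equal_solve : Prop := ∀ (A : Int), Dom_solve A → Spec_solve A (solve A)

-- ===== LEMMAS AND PROOFS =====

-- the n-th (1-indexed) positive integer whose digits are all in {1,2,3}
def pvF : Nat → Int
  | 0 => 0
  | m+1 => pvF (m / 3) * 10 + (((m % 3 : Nat) : Int) + 1)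

lemma pvF_zero : pvF 0 = 0 := by rw [pvF]

lemma pvF_succ (m : Nat) : pvF (m + 1) = pvF (m / 3) * 10 + (((m % 3 : Nat) : Int) + 1) := by
  rw [pvF]

lemma pvF_one : pvF 1 = 1 := by
  rw [show (1 : Nat) = 0 + 1 from rfl, pvF_succ, pvF_zero]; norm_num

lemma pvF_two : pvF 2 = 2 := by
  rw [show (2 : Nat) = 1 + 1 from rfl, pvF_succ, pvF_zero]; norm_num

lemma pvF_three : pvF 3 = 3 := by
  rw [show (3 : Nat) = 2 + 1 from rfl, pvF_succ, pvF_zero]; norm_num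

lemma pvF_child1 (m : Nat) : pvF (3 * m + 1) = pvF m * 10 + 1 := by
  have h1 : (3 * m) / 3 = m := by omega
  have h2 : (3 * m) % 3 = 0 := by omega
  rw [show 3 * m + 1 = (3 * m) + 1 from rfl, pvF_succ, h1, h2]; norm_num

lemma pvF_child2 (m : Nat) : pvF (3 * m + 2) = pvF m * 10 + 2 := by
  have h1 : (3 * m + 1) / 3 = m := by omega
  have h2 : (3 * m + 1) % 3 = 1 := by omega
  rw [show 3 * m + 2 = (3 * m + 1) + 1 from rfl, pvF_succ, h1, h2]; norm_num

lemma pvF_child3 (m : Nat) : pvF (3 * m + 3) = pvF m * 10 + 3 := by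
  have h1 : (3 * m + 2) / 3 = m := by omega
  have h2 : (3 * m + 2) % 3 = 2 := by omega
  rw [show 3 * m + 3 = (3 * m + 2) + 1 from rfl, pvF_succ, h1, h2]; norm_num

-- step-1 range' bookkeeping helpers
lemma range1_concat (s n : Nat) : List.range' s (n + 1) = List.range' s n ++ [s + n] := by
  simp [List.range'_concat]

lemma range1_append (s m n : Nat) : List.range' s m ++ List.range' (s + m) n = List.range' s (m + n) := by
  simp

lemma range1_take : ∀ (n s k : Nat), (List.range' s n).take k = List.range' s (min k n) := by
  intro n
  induction n with
  | zero => intro s k; simp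
  | succ m ih =>
    intro s k
    cases k with
    | zero => simp
    | succ j =>
      rw [List.range'_succ, List.take_succ_cons, ih (s + 1) j,
        show min (j + 1) (m + 1) = (min j m) + 1 by omega, List.range'_succ]

lemma altLoop_stop (A : Int) (fuel : Nat) (ans level : List Int)
    (h : ¬ ((ans.length : Int) < A)) : altLoop A fuel ans level = ans := by
  cases fuel with
  | zero => rfl
  | succ f => simp [altLoop, h]

-- the flatMap over a contiguous index block of pvF-values is the next contiguous block
lemma level_shift : ∀ (n a : Nat),
    (List.map pvF (List.range' a n)).flatMap (fun x => [10 * x + 1, 10 * x + 2, 10 * x + 3])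
      = List.map pvF (List.range' (3 * a + 1) (3 * n)) := by
  intro n
  induction n with
  | zero => simp
  | succ k ih =>
    intro a
    rw [List.range'_succ, List.map_cons, List.flatMap_cons, ih (a + 1)]
    have e1 : [10 * pvF a + 1, 10 * pvF a + 2, 10 * pvF a + 3]
        = List.map pvF (List.range' (3 * a + 1) 3) := by
      have c1 := pvF_child1 a
      have c2 := pvF_child2 a
      have c3 := pvF_child3 a
      simp [List.range'_succ]
      refine ⟨by rw [c1]; ring, ?_, ?_⟩
      · rw [show 3 * a + 1 + 1 = 3 * a + 2 from rfl, c2]; ring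
      · rw [show 3 * a + 1 + 1 + 1 = 3 * a + 3 from rfl, c3]; ring
    rw [e1, ← List.map_append]
    have e2 : List.range' (3 * a + 1) 3 ++ List.range' (3 * (a + 1) + 1) (3 * k)
        = List.range' (3 * a + 1) (3 * (k + 1)) := by
      have := range1_append (3 * a + 1) 3 (3 * k)
      rw [show 3 * a + 1 + 3 = 3 * (a + 1) + 1 by ring] at this
      rw [this]; congr 1; ring
    rw [e2]

-- loop invariant of A's BFS: ans holds pvF 1..i, the queue holds pvF (i+1)..cnt,
-- and while the loop is still enqueuing (cnt < A) we have cnt = 3*(i+1)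
lemma solveA_inv : ∀ (fuel i cnt : Nat) (A : Int),
    fuel = (A - (i : Int)).toNat →
    (0 < fuel → i < cnt) →
    ((cnt : Int) < A → cnt = 3 * (i + 1)) →
    solveLoop A fuel (List.map pvF (List.range' 1 i)) (List.map pvF (List.range' (i + 1) (cnt - i))) (cnt : Int)
      = List.map pvF (List.range' 1 (i + fuel)) := by
  intro fuel
  induction fuel with
  | zero => intro i cnt A _ _ _; simp [solveLoop]
  | succ f ih =>
    intro i cnt A hf hic hcnt
    have hiA : (i : Int) < A := by omega
    have hic' : i < cnt := hic (by omega)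
    have hq : cnt - i = (cnt - i - 1) + 1 := by omega
    rw [hq, List.range'_succ, List.map_cons]
    show solveLoop A (f + 1) _ (pvF (i+1) :: _) _ = _
    rw [solveLoop]
    have h1 : List.map pvF (List.range' 1 i) ++ [pvF (i+1)] = List.map pvF (List.range' 1 (i+1)) := by
      rw [range1_concat 1 i, List.map_append]
      simp [Nat.add_comm]
    by_cases hca : (cnt : Int) ≥ A
    · simp only [hca, if_true, h1]
      have h2 : List.range' (i + 1 + 1) (cnt - i - 1) = List.range' ((i+1) + 1) (cnt - (i+1)) := by
        rw [Nat.sub_sub]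
      have hf' : f = (A - ((i + 1 : Nat) : Int)).toNat := by push_cast; omega
      have hic2 : 0 < f → i + 1 < cnt := by intro h0; omega
      have hcnt2 : (cnt : Int) < A → cnt = 3 * ((i + 1) + 1) := fun h => absurd h (by omega)
      rw [h2, ih (i+1) cnt A hf' hic2 hcnt2, show (i + 1) + f = i + (f + 1) by omega]
    · simp only [hca, if_false, h1]
      have hc3 : cnt = 3 * (i + 1) := hcnt (by omega)
      have hq2 : List.map pvF (List.range' (i + 1 + 1) (cnt - i - 1)) ++
            [pvF (i+1) * 10 + 1, pvF (i+1) * 10 + 2, pvF (i+1) * 10 + 3]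
          = List.map pvF (List.range' ((i+1) + 1) ((cnt + 3) - (i+1))) := by
      
        have echild : [pvF (i+1) * 10 + 1, pvF (i+1) * 10 + 2, pvF (i+1) * 10 + 3]
            = List.map pvF (List.range' (cnt + 1) 3) := by
          have c1 := pvF_child1 (i+1)
          have c2 := pvF_child2 (i+1)
          have c3 := pvF_child3 (i+1)
          simp [List.range'_succ]
          refine ⟨?_, ?_, ?_⟩
          · rw [show cnt + 1 = 3 * (i + 1) + 1 by omega, c1]
          · rw [show cnt + 1 + 1 = 3 * (i + 1) + 2 by omega, c2]
          · rw [show cnt + 1 + 1 + 1 = 3 * (i + 1) + 3 by omega, c3]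
        rw [echild, ← List.map_append]
        congr 1
        have := range1_append (i + 2) (cnt - i - 1) 3
        rw [show i + 2 + (cnt - i - 1) = cnt + 1 by omega] at this
        rw [show (i : Nat) + 1 + 1 = i + 2 from rfl, this]
        congr 1
        omega
      rw [hq2]
      have hcast : ((cnt : Int) + 3) = (((cnt + 3 : Nat)) : Int) := by push_cast; ring
      have hf' : f = (A - (((i + 1 : Nat)) : Int)).toNat := by push_cast; omega
      have hic2 : 0 < f → i + 1 < cnt + 3 := by intro _; omega
      have hcnt2 : ((cnt + 3 : Nat) : Int) < A → cnt + 3 = 3 * ((i + 1) + 1) := by intro _; omega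
      rw [hcast, ih (i+1) (cnt+3) A hf' hic2 hcnt2, show (i + 1) + f = i + (f + 1) by omega]

-- loop invariant of B: ans holds pvF 1..i, level is the contiguous block pvF (i+1)..(i+n) with n = 2*i+3
lemma solveB_inv : ∀ (fuel i n : Nat) (A : Int),
    A.toNat ≤ i + fuel →
    n = 2 * i + 3 →
    altLoop A fuel (List.map pvF (List.range' 1 i)) (List.map pvF (List.range' (i + 1) n))
      = List.map pvF (List.range' 1 (max i A.toNat)) := by
  intro fuel
  induction fuel with
  | zero =>
    intro i n A hfu _
    have : max i A.toNat = i := by omega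
    rw [this]; rfl
  | succ f ih =>
    intro i n A hfu hn
    rw [altLoop]
    have hlen : (List.map pvF (List.range' 1 i)).length = i := by simp
    by_cases hg : ((List.map pvF (List.range' 1 i)).length : Int) < A
    · simp only [hg, if_true]
      have hiA : (i : Int) < A := by rw [hlen] at hg; exact hg
      have hmax : max i A.toNat = A.toNat := by omega
      have hneed : (A - ((List.map pvF (List.range' 1 i)).length : Int)).toNat = A.toNat - i := by
        rw [hlen]; omega
      rw [hneed, ← List.map_take, range1_take]
      by_cases hfin : A.toNat - i ≤ n
      · -- final (possibly partial) block: the guard fails afterwards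
        rw [Nat.min_eq_left hfin, ← List.map_append]
        rw [show List.range' 1 i ++ List.range' (i + 1) (A.toNat - i)
              = List.range' 1 (i + (A.toNat - i)) from by
            have := range1_append 1 i (A.toNat - i)
            rw [show 1 + i = i + 1 by omega] at this
            exact this]
        rw [show i + (A.toNat - i) = A.toNat by omega]
        rw [altLoop_stop]
        · rw [hmax]
        · rw [List.length_map, List.length_range']
          omega
      · -- whole block consumed; recurse on the next level
        rw [Nat.min_eq_right (by omega), ← List.map_append]
        rw [show List.range' 1 i ++ List.range' (i + 1) n = List.range' 1 (i + n) from by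
            have := range1_append 1 i n
            rw [show 1 + i = i + 1 by omega] at this
            exact this]
        rw [level_shift]
        rw [show 3 * (i + 1) + 1 = (i + n) + 1 by omega, show 3 * n = 2 * (i + n) + 3 by omega]
        rw [ih (i + n) (2 * (i + n) + 3) A (by omega) rfl,
          show max (i + n) A.toNat = max i A.toNat by omega]
    · simp only [hg, if_false]
      rw [hlen] at hg
      have : max i A.toNat = i := by omega
      rw [this]

lemma solve_eq_pvF (A : Int) : solve A = List.map pvF (List.range' 1 A.toNat) := by
  unfold solve
  have e : ([1, 2, 3] : List Int) = List.map pvF (List.range' 1 3) := by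
    simp [List.range'_succ, pvF_one, pvF_two, pvF_three]
  rw [e]
  have h := solveA_inv A.toNat 0 3 A (by omega) (by omega) (by omega)
  simpa using h

lemma solve_alt_eq_pvF (A : Int) : solve_alt A = List.map pvF (List.range' 1 A.toNat) := by
  unfold solve_alt
  have e : ([1, 2, 3] : List Int) = List.map pvF (List.range' 1 3) := by
    simp [List.range'_succ, pvF_one, pvF_two, pvF_three]
  rw [e]
  have h := solveB_inv A.toNat 0 3 A (by omega) (by omega)
  simpa using h

-- ===== VERDICT (by name: the statement is the Claim_ definition above) =====
theorem solve_spec : Claim_equal_solve := by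
  intro A _
  unfold Spec_solve
  rw [solve_eq_pvF, solve_alt_eq_pvF]
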